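-- pv_equiv track=rewrite | github.com/DDK1127/work_project | main.py | count_params_chars
-- ===== SOURCE A (Python) =====
-- def count_params_chars(parameters):
--     qty_dot_params = sum(param.count('.') for param in parameters.values())
--     qty_hyphen_params = sum(param.count('-') for param in parameters.values())
--     qty_underline_params = sum(param.count('_') for param in parameters.values())
--     qty_slash_params = sum(param.count('/') for param in parameters.values())
--     qty_questionmark_params = sum(param.count('?') for param in parameters.values())
--     qty_equal_params = sum(param.count('=') for param in parameters.values())
--     qty_at_params = sum(param.count('@') for param in parameters.values())
--     qty_and_params = sum(param.count('&') for param in parameters.values())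
--     qty_exclamation_params = sum(param.count('!') for param in parameters.values())
--     qty_space_params = sum(param.count(' ') for param in parameters.values())
--     qty_tilde_params = sum(param.count('~') for param in parameters.values())
--     qty_comma_params = sum(param.count(',') for param in parameters.values())
--     qty_plus_params = sum(param.count('+') for param in parameters.values())
--     qty_asterisk_params = sum(param.count('*') for param in parameters.values())
--     qty_hashtag_params = sum(param.count('#') for param in parameters.values())
--     qty_dollar_params = sum(param.count('$') for param in parameters.values())
--     qty_percent_params = sum(param.count('%') for param in parameters.values())
--     params_length = sum(len(param) for param in parameters.values())
--     return qty_dot_params, qty_hyphen_params, qty_underline_params, qty_slash_params, qty_questionmark_params, qty_equal_params, qty_at_params, qty_and_params, qty_exclamation_params, qty_space_params, qty_tilde_params, qty_comma_params, qty_plus_params, qty_asterisk_params, qty_hashtag_params, qty_dollar_params, qty_percent_params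
-- ===== SOURCE B (Python) =====
-- def count_params_chars(parameters):
--     tally = {c: 0 for c in ".-_/?=@&! ~,+*#$%"}
--     for param in parameters.values():
--         for ch in param:
--             if ch in tally:
--                 tally[ch] += 1
--     return tuple(tally.values())
-- ===== Notes on version B (the rewrite author's own statement) =====
-- stated objective: faster
-- what changed: Replaces 17 separate full passes over the parameter values (one str.count scan per target character) with a single pass over all characters that bumps a preinitialised 17-key tally dict.
import Mathlib
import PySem

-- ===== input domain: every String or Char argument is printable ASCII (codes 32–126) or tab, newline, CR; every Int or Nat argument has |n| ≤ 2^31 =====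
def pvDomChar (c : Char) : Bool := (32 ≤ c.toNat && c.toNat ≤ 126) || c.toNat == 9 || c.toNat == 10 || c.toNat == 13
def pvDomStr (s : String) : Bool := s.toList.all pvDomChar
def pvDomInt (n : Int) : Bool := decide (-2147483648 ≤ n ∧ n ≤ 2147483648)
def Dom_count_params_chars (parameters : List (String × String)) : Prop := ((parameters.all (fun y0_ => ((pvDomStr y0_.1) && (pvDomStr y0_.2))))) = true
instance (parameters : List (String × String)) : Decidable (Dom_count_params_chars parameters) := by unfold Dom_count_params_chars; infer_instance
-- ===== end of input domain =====

-- B replaces A's 17 separate full scans (one str.count pass per target character) by one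
-- pass over all characters bumping a preinitialised 17-key tally dict (objective: faster).

-- ===== PORT A =====
-- A reads parameters.values() seventeen times, once per target character.
def count_params_chars (parameters : List (String × String)) : List Int :=
  let qty_dot_params : Int := ((parameters.map Prod.snd).map (fun param => (PySem.Str.count param "." : Int))).sum
  let qty_hyphen_params : Int := ((parameters.map Prod.snd).map (fun param => (PySem.Str.count param "-" : Int))).sum
  let qty_underline_params : Int := ((parameters.map Prod.snd).map (fun param => (PySem.Str.count param "_" : Int))).sum
  let qty_slash_params : Int := ((parameters.map Prod.snd).map (fun param => (PySem.Str.count param "/" : Int))).sum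
  let qty_questionmark_params : Int := ((parameters.map Prod.snd).map (fun param => (PySem.Str.count param "?" : Int))).sum
  let qty_equal_params : Int := ((parameters.map Prod.snd).map (fun param => (PySem.Str.count param "=" : Int))).sum
  let qty_at_params : Int := ((parameters.map Prod.snd).map (fun param => (PySem.Str.count param "@" : Int))).sum
  let qty_and_params : Int := ((parameters.map Prod.snd).map (fun param => (PySem.Str.count param "&" : Int))).sum
  let qty_exclamation_params : Int := ((parameters.map Prod.snd).map (fun param => (PySem.Str.count param "!" : Int))).sum
  let qty_space_params : Int := ((parameters.map Prod.snd).map (fun param => (PySem.Str.count param " " : Int))).sum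
  let qty_tilde_params : Int := ((parameters.map Prod.snd).map (fun param => (PySem.Str.count param "~" : Int))).sum
  let qty_comma_params : Int := ((parameters.map Prod.snd).map (fun param => (PySem.Str.count param "," : Int))).sum
  let qty_plus_params : Int := ((parameters.map Prod.snd).map (fun param => (PySem.Str.count param "+" : Int))).sum
  let qty_asterisk_params : Int := ((parameters.map Prod.snd).map (fun param => (PySem.Str.count param "*" : Int))).sum
  let qty_hashtag_params : Int := ((parameters.map Prod.snd).map (fun param => (PySem.Str.count param "#" : Int))).sum
  let qty_dollar_params : Int := ((parameters.map Prod.snd).map (fun param => (PySem.Str.count param "$" : Int))).sum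
  let qty_percent_params : Int := ((parameters.map Prod.snd).map (fun param => (PySem.Str.count param "%" : Int))).sum
  let _params_length : Int := ((parameters.map Prod.snd).map (fun param => (PySem.Str.len param : Int))).sum
  [qty_dot_params, qty_hyphen_params, qty_underline_params, qty_slash_params,
   qty_questionmark_params, qty_equal_params, qty_at_params, qty_and_params,
   qty_exclamation_params, qty_space_params, qty_tilde_params, qty_comma_params,
   qty_plus_params, qty_asterisk_params, qty_hashtag_params, qty_dollar_params,
   qty_percent_params]

-- ===== PORT B =====
-- One pass over all characters of all values, bumping a 17-key tally dict.
def count_params_chars_alt (parameters : List (String × String)) : List Int :=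
  let tally0 : PySem.Dict Char Int :=
    ".-_/?=@&! ~,+*#$%".toList.foldl (fun d c => d.insert c 0) PySem.Dict.empty
  let tally : PySem.Dict Char Int :=
    (parameters.map Prod.snd).foldl
      (fun d param => param.toList.foldl
        (fun d ch => if d.contains ch then d.modify ch 0 (· + 1) else d) d)
      tally0
  tally.values

-- ===== PRECONDITION & SPEC =====
def Spec_count_params_chars (parameters : List (String × String)) (out : List Int) : Prop := out = count_params_chars_alt parameters
instance (parameters : List (String × String)) (out : List Int) : Decidable (Spec_count_params_chars parameters out) := by unfold Spec_count_params_chars; infer_instance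

-- ===== CLAIM (what is proved, stated in full; the proofs are below) =====
def Claim_equal_count_params_chars : Prop := ∀ (parameters : List (String × String)), Dom_count_params_chars parameters → Spec_count_params_chars parameters (count_params_chars parameters)

-- ===== LEMMAS AND PROOFS =====

-- s.count('c') for a single character is the List.count of that character.
lemma go_single (c : Char) : ∀ (fuel : Nat) (s : List Char) (acc : Nat), s.length ≤ fuel →
    PySem.Chars.count.go [c] fuel s acc = acc + s.count c := by
  intro fuel
  induction fuel with
  | zero =>
    intro s acc h
    cases s with
    | nil => simp [PySem.Chars.count.go]
    | cons h t => simp at h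
  | succ n ih =>
    intro s acc h
    cases s with
    | nil => simp [PySem.Chars.count.go]
    | cons x t =>
      simp only [List.length_cons, Nat.succ_le_succ_iff] at h
      unfold PySem.Chars.count.go
      by_cases hx : c = x
      · subst hx
        simp [List.isPrefixOf, ih t _ h]
        omega
      · have : ([c].isPrefixOf (x :: t)) = false := by
          simp [List.isPrefixOf]
          exact fun hxc => hx hxc
        simp [this, ih t _ h, List.count_cons]
        intro hxe; exact absurd hxe.symm hx

lemma charsCount_single (s : List Char) (c : Char) :
    PySem.Chars.count s [c] = s.count c := by
  unfold PySem.Chars.count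
  simp [List.isEmpty, go_single c s.length s 0 (le_refl _)]

-- The inner character loop keeps the key set and adds l.count c to the entry of each present key.
lemma inner_keys (l : List Char) (d : PySem.Dict Char Int) :
    (l.foldl (fun d ch => if d.contains ch then d.modify ch 0 (· + 1) else d) d).keys = d.keys := by
  induction l generalizing d with
  | nil => rfl
  | cons x t ih =>
    simp only [List.foldl_cons]
    by_cases hx : d.contains x = true
    · rw [if_pos hx, ih]
      simp [hx, PySem.Dict.keys_insert_of_contains, PySem.Dict.keys_modify]
    · rw [if_neg hx, ih]

lemma inner_getD (l : List Char) (d : PySem.Dict Char Int) (c : Char)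
    (hc : d.contains c = true) :
    (l.foldl (fun d ch => if d.contains ch then d.modify ch 0 (· + 1) else d) d).getD c 0
      = d.getD c 0 + (l.count c : Int) := by
  induction l generalizing d with
  | nil => simp
  | cons x t ih =>
    simp only [List.foldl_cons]
    by_cases hx : d.contains x = true
    · rw [if_pos hx, ih _ (by simp [PySem.Dict.contains_modify, hc])]
      rw [PySem.Dict.getD_modify]
      by_cases hcx : c = x
      · subst hcx; simp; ring
      · simp [hcx, Ne.symm hcx]
    · rw [if_neg hx, ih _ hc]
      have hcx : c ≠ x := by intro h; subst h; exact hx hc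
      simp [Ne.symm hcx]

lemma outer_keys (ps : List String) (d : PySem.Dict Char Int) :
    (ps.foldl (fun d param => param.toList.foldl
        (fun d ch => if d.contains ch then d.modify ch 0 (· + 1) else d) d) d).keys = d.keys := by
  induction ps generalizing d with
  | nil => rfl
  | cons p t ih => simp only [List.foldl_cons]; rw [ih, inner_keys]

lemma outer_getD (ps : List String) (d : PySem.Dict Char Int) (c : Char)
    (hc : d.contains c = true) :
    (ps.foldl (fun d param => param.toList.foldl
        (fun d ch => if d.contains ch then d.modify ch 0 (· + 1) else d) d) d).getD c 0
      = d.getD c 0 + (ps.map (fun s => (s.toList.count c : Int))).sum := by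
  induction ps generalizing d with
  | nil => simp
  | cons p t ih =>
    simp only [List.foldl_cons, List.map_cons, List.sum_cons]
    have hc' : (p.toList.foldl (fun d ch => if d.contains ch then d.modify ch 0 (· + 1) else d) d).contains c = true := by
      rw [PySem.Dict.contains_iff_mem_keys] at hc ⊢
      rw [inner_keys]; exact hc
    rw [ih _ hc', inner_getD _ _ _ hc]
    ring

-- A's per-character sum equals the single-pass tally for that character.
lemma comp_eq (ps : List String) (c : Char) (s : String) (hs : s.toList = [c]) :
    ((ps.map (fun param => (PySem.Str.count param s : Int)))).sum
      = (ps.map (fun t => (t.toList.count c : Int))).sum := by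
  congr 1
  apply List.map_congr_left
  intro p _
  rw [PySem.Str.count_eq, hs, charsCount_single]

theorem count_params_chars_spec : Claim_equal_count_params_chars := by
  intro parameters _
  unfold Spec_count_params_chars count_params_chars count_params_chars_alt
  dsimp only
  have hkeys := (outer_keys (List.map Prod.snd parameters)
      (List.foldl (fun d c => d.insert c 0) PySem.Dict.empty ".-_/?=@&! ~,+*#$%".toList)).trans
    (by decide : (List.foldl (fun d c => d.insert c 0) PySem.Dict.empty ".-_/?=@&! ~,+*#$%".toList).keys = ['.', '-', '_', '/', '?', '=', '@', '&', '!', ' ', '~', ',', '+', '*', '#', '$', '%'])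
  rw [PySem.Dict.values_eq_map_keys _ (hkeys ▸ (by decide : (['.', '-', '_', '/', '?', '=', '@', '&', '!', ' ', '~', ',', '+', '*', '#', '$', '%'] : List Char).Nodup)) 0, hkeys]
  have hget : ∀ c : Char,
      (List.foldl (fun d c => d.insert c 0) PySem.Dict.empty ".-_/?=@&! ~,+*#$%".toList).contains c = true →
      (List.foldl
        (fun d param => param.toList.foldl
          (fun d ch => if d.contains ch then d.modify ch 0 (· + 1) else d) d)
        (List.foldl (fun d c => d.insert c 0) PySem.Dict.empty ".-_/?=@&! ~,+*#$%".toList)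
        (List.map Prod.snd parameters)).getD c 0
        = ((List.map Prod.snd parameters).map (fun s => (s.toList.count c : Int))).sum := by
    intro c hc
    rw [outer_getD _ _ _ hc]
    simp [PySem.Dict.getD_insert, PySem.Dict.getD_empty]
  simp only [List.map_cons, List.map_nil]
  rw [hget '.' (by decide), hget '-' (by decide),
      hget '_' (by decide), hget '/' (by decide),
      hget '?' (by decide), hget '=' (by decide),
      hget '@' (by decide), hget '&' (by decide),
      hget '!' (by decide), hget ' ' (by decide),
      hget '~' (by decide), hget ',' (by decide),
      hget '+' (by decide), hget '*' (by decide),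
      hget '#' (by decide), hget '$' (by decide),
      hget '%' (by decide)]
  rw [comp_eq _ '.' "." (by decide), comp_eq _ '-' "-" (by decide),
      comp_eq _ '_' "_" (by decide), comp_eq _ '/' "/" (by decide),
      comp_eq _ '?' "?" (by decide), comp_eq _ '=' "=" (by decide),
      comp_eq _ '@' "@" (by decide), comp_eq _ '&' "&" (by decide),
      comp_eq _ '!' "!" (by decide), comp_eq _ ' ' " " (by decide),
      comp_eq _ '~' "~" (by decide), comp_eq _ ',' "," (by decide),
      comp_eq _ '+' "+" (by decide), comp_eq _ '*' "*" (by decide),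
      comp_eq _ '#' "#" (by decide), comp_eq _ '$' "$" (by decide),
      comp_eq _ '%' "%" (by decide)]
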